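-- pv_equiv track=rewrite | github.com/XYZerda/CENG-111 | THE4/the4.py | datum_finder
-- ===== SOURCE A (Python) =====
-- def datum_finder(L):
--     max_o_index = -1
--     max_o = -1
--     for i in range(len(L)):
--         amount_of_o = L[i].count("o")
--         if amount_of_o > max_o:
--             max_o_index = i
--             max_o = amount_of_o
--     return max_o_index
-- ===== SOURCE B (Python) =====
-- def datum_finder(L):
--     def best(lo, hi):
--         # first-occurrence argmax of 'o'-counts in L[lo:hi], as (index, count); (-1, -1) if empty
--         if hi - lo <= 0:
--             return (-1, -1)
--         if hi - lo == 1: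
--             return (lo, L[lo].count("o"))
--         mid = (lo + hi) // 2
--         li, lc = best(lo, mid)
--         ri, rc = best(mid, hi)
--         return (li, lc) if lc >= rc else (ri, rc)
--     return best(0, len(L))[0]
-- ===== Notes on version B (the rewrite author's own statement) =====
-- stated objective: alternative
-- what changed: Replaces A's single linear running-max loop with a recursive divide-and-conquer tournament: the list is split in halves, each half's first argmax is computed recursively, and the two winners are merged with ties going to the left half.
import Mathlib
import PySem

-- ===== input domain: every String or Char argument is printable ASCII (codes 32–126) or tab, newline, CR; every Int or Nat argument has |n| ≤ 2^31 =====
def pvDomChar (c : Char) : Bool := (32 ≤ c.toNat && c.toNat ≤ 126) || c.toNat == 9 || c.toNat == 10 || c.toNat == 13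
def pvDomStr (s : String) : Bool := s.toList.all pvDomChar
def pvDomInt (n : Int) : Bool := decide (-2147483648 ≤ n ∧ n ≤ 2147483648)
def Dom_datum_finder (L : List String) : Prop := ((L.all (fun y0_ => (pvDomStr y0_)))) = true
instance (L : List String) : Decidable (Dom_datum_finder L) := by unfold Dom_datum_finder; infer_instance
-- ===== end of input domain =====

-- B replaces A's single linear running-max loop with a divide-and-conquer tournament
-- (recursive halving, ties merged to the left half); an alternative decomposition, same result.

-- ===== PORT A =====
-- A: single fused loop over indices tracking (max_o_index, max_o), update on strictly greater.
def datum_finder (L : List String) : Int :=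
  let st := (PySem.List.pyRange 0 (L.length : Int) 1).foldl
    (fun (acc : Int × Int) i =>
      let amount_of_o : Int := (PySem.Str.count (PySem.List.pyGetD L i "") "o" : Int)
      if amount_of_o > acc.2 then (i, amount_of_o) else acc)
    (-1, -1)
  st.1

-- ===== PORT B =====
-- B's helper best(lo, hi): first-occurrence argmax of 'o'-counts in L[lo:hi] by halving.
def pvBestB (L : List String) (lo hi : Int) : Int × Int :=
  if _h0 : hi - lo ≤ 0 then (-1, -1)
  else if _h1 : hi - lo = 1 then
    (lo, (PySem.Str.count (PySem.List.pyGetD L lo "") "o" : Int))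
  else
    let mid := PySem.Int.floordiv (lo + hi) 2
    let l := pvBestB L lo mid
    let r := pvBestB L mid hi
    if l.2 ≥ r.2 then l else r
termination_by (hi - lo).toNat
decreasing_by
  · have h1 : lo + 1 ≤ PySem.Int.floordiv (lo + hi) 2 :=
      (PySem.Int.le_floordiv_iff_mul_le (by omega)).mpr (by omega)
    have h2 : PySem.Int.floordiv (lo + hi) 2 < hi :=
      (PySem.Int.floordiv_lt_iff_lt_mul (by omega)).mpr (by omega)
    omega
  · have h2 : PySem.Int.floordiv (lo + hi) 2 < hi :=
      (PySem.Int.floordiv_lt_iff_lt_mul (by omega)).mpr (by omega)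
    have h1 : lo + 1 ≤ PySem.Int.floordiv (lo + hi) 2 :=
      (PySem.Int.le_floordiv_iff_mul_le (by omega)).mpr (by omega)
    omega

-- B: tournament over the whole list.
def datum_finder_alt (L : List String) : Int :=
  (pvBestB L 0 (L.length : Int)).1

-- ===== PRECONDITION & SPEC =====
def Spec_datum_finder (L : List String) (out : Int) : Prop := out = datum_finder_alt L
instance (L : List String) (out : Int) : Decidable (Spec_datum_finder L out) := by unfold Spec_datum_finder; infer_instance

-- ===== CLAIM (what is proved, stated in full; the proofs are below) =====
def Claim_equal_datum_finder : Prop := ∀ (L : List String), Dom_datum_finder L → Spec_datum_finder L (datum_finder L)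

-- ===== LEMMAS AND PROOFS =====

-- the common specification both programs compute: first-occurrence argmax (as (base+index, max)) of a counts segment
def pvSpecBest (base : Int) : List Int → Int × Int
  | [] => (-1, -1)
  | c :: t => (base + (((c :: t).idxOf (t.foldl max c) : Nat) : Int), t.foldl max c)

-- A's index loop 'for i in range(len(L)): … L[i] …' as a fold over enumerate.
theorem pv_foldl_pyRange_enum {σ : Type} (f : σ → Int → String → σ) :
    ∀ (suf pre : List String) (acc : σ),
      (PySem.List.pyRange (pre.length : Int) ((pre.length : Int) + (suf.length : Int)) 1).foldl
          (fun a i => f a i (PySem.List.pyGetD (pre ++ suf) i "")) acc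
        = (PySem.List.enumerate suf (pre.length : Int)).foldl (fun a p => f a p.1 p.2) acc := by
  intro suf
  induction suf with
  | nil => intro pre acc; simp [PySem.List.enumerate_nil, PySem.List.pyRange_one_eq_nil]
  | cons s t ih =>
    intro pre acc
    rw [PySem.List.pyRange_one_cons (by simp only [List.length_cons]; omega)]
    simp only [List.foldl_cons, PySem.List.enumerate_cons]
    have hget : PySem.List.pyGetD (pre ++ s :: t) (pre.length : Int) "" = s := by
      rw [PySem.List.pyGetD_natCast]
      simp
    rw [hget]
    have h1 : ((pre.length : Int) + 1) = ((pre ++ [s]).length : Int) := by simp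
    have h2 : ((pre.length : Int) + ((s :: t).length : Int)) = ((pre ++ [s]).length : Int) + (t.length : Int) := by
      simp; omega
    have h3 : pre ++ s :: t = (pre ++ [s]) ++ t := by simp
    rw [h1, h2, h3, ih]

-- first occurrence index shifts by one past a non-matching head
theorem pv_idxOf_cons_ne {x v : Int} (h : x ≠ v) (l : List Int) :
    (x :: l).idxOf v = l.idxOf v + 1 := by simp [h]

-- A's running strictly-greater argmax over 'enumerate' lands on the first-max spec
theorem pv_key (cnt : String → Int) :
    ∀ (xs : List String) (a bi bm : Int),
      (PySem.List.enumerate xs a).foldl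
          (fun (acc : Int × Int) p => if cnt p.2 > acc.2 then (p.1, cnt p.2) else acc) (bi, bm)
        = (let cs := xs.map cnt; let M := cs.foldl max bm;
           if bm < M then (a + ((cs.idxOf M : Nat) : Int), M) else (bi, bm)) := by
  intro xs
  induction xs with
  | nil => intro a bi bm; simp [PySem.List.enumerate_nil]
  | cons s t ih =>
    intro a bi bm
    simp only [PySem.List.enumerate_cons, List.foldl_cons, List.map_cons]
    by_cases h : cnt s > bm
    · rw [if_pos h, ih]
      have hmax : max bm (cnt s) = cnt s := by omega
      simp only [hmax]
      by_cases h2 : cnt s < (t.map cnt).foldl max (cnt s)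
      · rw [if_pos h2]
        have hM : bm < (t.map cnt).foldl max (cnt s) := by omega
        rw [if_pos hM,
            pv_idxOf_cons_ne (by omega : cnt s ≠ (t.map cnt).foldl max (cnt s)) (t.map cnt)]
        simp only [Prod.mk.injEq]
        exact ⟨by push_cast; ring, trivial⟩
      · rw [if_neg h2]
        have hle : cnt s ≤ (t.map cnt).foldl max (cnt s) :=
          (PySem.List.le_foldl_max (t.map cnt) (cnt s)).1
        have heq : (t.map cnt).foldl max (cnt s) = cnt s := by omega
        rw [heq, if_pos h]
        simp
    · rw [if_neg h, ih]
      have hmax : max bm (cnt s) = bm := by omega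
      simp only [hmax]
      by_cases h2 : bm < (t.map cnt).foldl max bm
      · rw [if_pos h2, if_pos h2,
            pv_idxOf_cons_ne (by omega : cnt s ≠ (t.map cnt).foldl max bm) (t.map cnt)]
        simp only [Prod.mk.injEq]
        exact ⟨by push_cast; ring, trivial⟩
      · rw [if_neg h2, if_neg h2]

theorem pv_foldl_max_mem : ∀ (t : List Int) (c : Int), t.foldl max c ∈ c :: t := by
  intro t
  induction t with
  | nil => simp
  | cons x t ih =>
    intro c
    simp only [List.foldl_cons]
    rcases List.mem_cons.mp (ih (max c x)) with h1 | h1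
    · rw [h1]
      rcases max_choice c x with hc | hc <;> rw [hc] <;> simp
    · exact List.mem_cons.mpr (Or.inr (List.mem_cons.mpr (Or.inr h1)))

theorem pv_foldl_max_max : ∀ (t : List Int) (x y : Int),
    t.foldl max (max x y) = max x (t.foldl max y) := by
  intro t
  induction t with
  | nil => intro x y; simp
  | cons z t ih =>
    intro x y
    simp only [List.foldl_cons, max_assoc, ih]

-- merging two nonempty segments' first argmaxes: ties go left
theorem pv_spec_append (base : Int) (a : Int) (xs : List Int) (b : Int) (ys : List Int) :
    pvSpecBest base ((a :: xs) ++ (b :: ys))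
      = (if (pvSpecBest base (a :: xs)).2 ≥ (pvSpecBest (base + ((a :: xs).length : Int)) (b :: ys)).2
         then pvSpecBest base (a :: xs)
         else pvSpecBest (base + ((a :: xs).length : Int)) (b :: ys)) := by
  simp only [pvSpecBest, List.cons_append]
  have hM : (xs ++ b :: ys).foldl max a = max (xs.foldl max a) (ys.foldl max b) := by
    rw [List.foldl_append]
    simp only [List.foldl_cons]
    exact pv_foldl_max_max ys (xs.foldl max a) b
  set M1 := xs.foldl max a with hM1
  set M2 := ys.foldl max b with hM2
  by_cases h : M1 ≥ M2
  · rw [if_pos h]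
    have hmx : max M1 M2 = M1 := by omega
    rw [hM, hmx]
    have hmem : M1 ∈ a :: xs := pv_foldl_max_mem xs a
    rw [show a :: (xs ++ b :: ys) = (a :: xs) ++ (b :: ys) from rfl,
        List.idxOf_append_of_mem hmem]
  · rw [if_neg h]
    have hmx : max M1 M2 = M2 := by omega
    rw [hM, hmx]
    have hnot : M2 ∉ a :: xs := by
      intro hmem
      rcases List.mem_cons.mp hmem with h1 | h1
      · have := (PySem.List.le_foldl_max xs a).1
        omega
      · have := (PySem.List.le_foldl_max xs a).2 M2 h1
        omega
    rw [show a :: (xs ++ b :: ys) = (a :: xs) ++ (b :: ys) from rfl,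
        List.idxOf_append_of_notMem hnot]
    simp only [Prod.mk.injEq]
    constructor
    · push_cast
      ring
    · trivial

-- B's tournament meets the spec on every nonempty in-range segment
theorem pv_bestB_spec (cs : List String) :
    ∀ (n : Nat) (lo hi : Int), (hi - lo).toNat = n → 0 ≤ lo → lo < hi → hi ≤ (cs.length : Int) →
      pvBestB cs lo hi
        = pvSpecBest lo (((cs.map (fun s => (PySem.Str.count s "o" : Int))).drop lo.toNat).take (hi - lo).toNat) := by
  intro n
  induction n using Nat.strong_induction_on with
  | _ n ih =>
    intro lo hi hn h0 hlh hhl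
    rw [pvBestB]
    rw [dif_neg (by omega : ¬ hi - lo ≤ 0)]
    by_cases h1 : hi - lo = 1
    · rw [dif_pos h1, h1]
      have hlt : lo.toNat < cs.length := by omega
      have hget : PySem.List.pyGetD cs lo "" = cs.getD lo.toNat "" := by
        rw [show lo = ((lo.toNat : Nat) : Int) by omega, PySem.List.pyGetD_natCast]
        simp
        rw [show max lo 0 = lo by omega]
      have hseg : ((cs.map (fun s => (PySem.Str.count s "o" : Int))).drop lo.toNat).take (1 : Int).toNat
          = [(PySem.Str.count (cs.getD lo.toNat "") "o" : Int)] := by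
        rw [List.drop_eq_getElem_cons (by simpa using hlt)]
        simp [List.getD, List.getElem?_eq_getElem hlt]
      rw [hseg, hget]
      simp [pvSpecBest]
    · rw [dif_neg h1]
      simp only []
      set mid := PySem.Int.floordiv (lo + hi) 2 with hmid
      have hm1 : lo + 1 ≤ mid :=
        (PySem.Int.le_floordiv_iff_mul_le (by omega)).mpr (by omega)
      have hm2 : mid < hi :=
        (PySem.Int.floordiv_lt_iff_lt_mul (by omega)).mpr (by omega)
      have ihl := ih (mid - lo).toNat (by omega) lo mid rfl h0 (by omega) (by omega)
      have ihr := ih (hi - mid).toNat (by omega) mid hi rfl (by omega) hm2 hhl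
      set cnts := cs.map (fun s => (PySem.Str.count s "o" : Int)) with hcnts
      have hlen : cnts.length = cs.length := by simp [hcnts]
      -- split the segment at mid
      have hsplit : (cnts.drop lo.toNat).take (hi - lo).toNat
          = (cnts.drop lo.toNat).take (mid - lo).toNat
            ++ (cnts.drop mid.toNat).take (hi - mid).toNat := by
        have h3 : (hi - lo).toNat = (mid - lo).toNat + (hi - mid).toNat := by omega
        rw [h3, List.take_add, List.drop_drop,
            show lo.toNat + (mid - lo).toNat = mid.toNat by omega]
      rw [ihl, ihr, hsplit]
      -- both halves are nonempty
      have hl1 : ((cnts.drop lo.toNat).take (mid - lo).toNat).length = (mid - lo).toNat := by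
        simp [List.length_take, List.length_drop, hlen]
        omega
      have hr1 : ((cnts.drop mid.toNat).take (hi - mid).toNat).length = (hi - mid).toNat := by
        simp [List.length_take, List.length_drop, hlen]
        omega
      obtain ⟨a, xs, hax⟩ : ∃ a xs, (cnts.drop lo.toNat).take (mid - lo).toNat = a :: xs := by
        cases hL : (cnts.drop lo.toNat).take (mid - lo).toNat with
        | nil => rw [hL] at hl1; simp at hl1; omega
        | cons a xs => exact ⟨a, xs, rfl⟩
      obtain ⟨b, ys, hby⟩ : ∃ b ys, (cnts.drop mid.toNat).take (hi - mid).toNat = b :: ys := by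
        cases hL : (cnts.drop mid.toNat).take (hi - mid).toNat with
        | nil => rw [hL] at hr1; simp at hr1; omega
        | cons b ys => exact ⟨b, ys, rfl⟩
      rw [hax, hby, pv_spec_append]
      have hbase : lo + (((a :: xs).length : Nat) : Int) = mid := by
        rw [← hax, hl1]
        omega
      rw [hbase]

-- ===== VERDICT (by name: the statement is the Claim_ definition above) =====
theorem datum_finder_spec : Claim_equal_datum_finder := by
  intro L _
  unfold Spec_datum_finder datum_finder datum_finder_alt
  cases L with
  | nil => simp [PySem.List.pyRange_one_eq_nil, pvBestB]
  | cons s t =>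
    -- A's side: fold over range = fold over enumerate = first-max spec
    have hA := pv_foldl_pyRange_enum
      (fun (a : Int × Int) (i : Int) (v : String) =>
        if (PySem.Str.count v "o" : Int) > a.2 then (i, (PySem.Str.count v "o" : Int)) else a)
      (s :: t) [] ((-1 : Int), (-1 : Int))
    simp only [List.length_nil, Nat.cast_zero, zero_add, List.nil_append] at hA
    rw [hA, pv_key (fun v => (PySem.Str.count v "o" : Int))]
    -- B's side: the tournament meets the same spec on the whole list
    have hB := pv_bestB_spec (s :: t) ((((s :: t).length : Int) - 0).toNat) 0 ((s :: t).length : Int)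
      rfl le_rfl (by simp) le_rfl
    rw [hB]
    simp only [Int.sub_zero, Int.toNat_natCast, Int.toNat_zero, List.drop_zero]
    rw [List.take_of_length_le (by simp)]
    simp only [List.map_cons, List.foldl_cons]
    set c : Int := (PySem.Str.count s "o" : Int) with hc
    set cls : List Int := t.map (fun v => (PySem.Str.count v "o" : Int)) with hcls
    have hc0 : 0 ≤ c := by positivity
    have hmax : max (-1 : Int) c = c := by omega
    rw [hmax]
    have hM : c ≤ cls.foldl max c := (PySem.List.le_foldl_max cls c).1
    rw [if_pos (by omega : (-1 : Int) < cls.foldl max c)]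
    simp [pvSpecBest]
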